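-- pv_equiv track=rewrite | github.com/DessimozLab/fold_tree | src/structalns.py | convolve_strings
-- ===== SOURCE A (Python) =====
-- def convolve_strings(str1, str2):
--     # Determine the lengths of the strings
--     len1, len2 = len(str1), len(str2)
--
--     if len(str1) < len(str2):
--         str1, str2 = str2, str1
--         len1, len2 = len2, len1
--
--     max_alignment = 0
--     max_count = 0
--
--     # Slide str2 over str1, starting with one character overlap
--     # and continue until str2 is again overlapping by just one character
--     for i in range(-len2 + 1, len1):
--         count = 0
--         for j in range(len2):
--             if 0 <= i + j < len1 and str1[i + j] == str2[j]:
--                 count += 1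
--
--         if count > max_count:
--             max_count = count
--             max_alignment = i
--
--     return max_alignment, max_count
-- ===== SOURCE B (Python) =====
-- def convolve_strings(str1, str2):
--     # Index the longer string's character positions once, then count matching
--     # pairs per offset; only offsets with at least one match compete.
--     if len(str1) < len(str2):
--         str1, str2 = str2, str1
--     pos = {}
--     for idx, ch in enumerate(str1):
--         pos.setdefault(ch, []).append(idx)
--     counts = {}
--     for j, ch in enumerate(str2):
--         for i1 in pos.get(ch, ()):
--             counts[i1 - j] = counts.get(i1 - j, 0) + 1
--     best_off = best_cnt = 0
--     for off, cnt in counts.items():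
--         if cnt > best_cnt or (cnt == best_cnt and off < best_off):
--             best_off, best_cnt = off, cnt
--     return best_off, best_cnt
-- ===== Notes on version B (the rewrite author's own statement) =====
-- stated objective: faster
-- what changed: Replaces the offset-by-offset double scan with a hash index of the longer string's character positions, a per-offset counter of matching pairs, and one selection pass over the offsets that have at least one match.
import Mathlib
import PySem

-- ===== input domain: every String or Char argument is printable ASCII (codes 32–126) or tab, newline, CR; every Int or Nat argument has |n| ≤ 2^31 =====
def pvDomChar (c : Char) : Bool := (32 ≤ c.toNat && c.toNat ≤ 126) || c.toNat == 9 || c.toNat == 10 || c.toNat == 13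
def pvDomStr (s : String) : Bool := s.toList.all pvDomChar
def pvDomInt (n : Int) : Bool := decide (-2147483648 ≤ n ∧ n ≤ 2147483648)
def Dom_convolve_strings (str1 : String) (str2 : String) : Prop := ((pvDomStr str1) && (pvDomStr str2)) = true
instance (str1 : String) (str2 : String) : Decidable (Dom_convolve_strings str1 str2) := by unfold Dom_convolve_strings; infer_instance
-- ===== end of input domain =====

-- B replaces A's offset-by-offset double scan with a hash index of the longer
-- string's character positions and a per-offset counter of matching pairs
-- (objective: faster — per-offset work becomes work per actual matching pair).

-- ===== PORT A =====
-- A's loop after the conditional swap: slide s2 over s1, count matches at each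
-- offset, keep the first offset with a strictly larger count
def convAloop (s1 : String) (s2 : String) (len1 : Int) (len2 : Int) : Int × Int :=
  (PySem.List.pyRange (-len2 + 1) len1).foldl
    (fun mx i =>
      let count : Int := (PySem.List.pyRange 0 len2).foldl
        (fun c j =>
          if (decide (0 ≤ i + j) && decide (i + j < len1)) &&
             (PySem.Str.pyGet? s1 (i + j) == PySem.Str.pyGet? s2 j) then c + 1 else c) 0
      if count > mx.2 then (i, count) else mx)
    (0, 0)

def convolve_strings (str1 : String) (str2 : String) : Int × Int :=
  let len1 := PySem.Str.len str1
  let len2 := PySem.Str.len str2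
  if len1 < len2 then convAloop str2 str1 len2 len1
  else convAloop str1 str2 len1 len2

-- ===== PORT B =====
-- B's body after the (identical) conditional swap: pos[ch] = list of positions
-- of ch in s1 (setdefault+append = modify with default []); counts[off] =
-- number of matching pairs at offset off; then one selection pass over
-- counts.items() keeping the larger count, smaller offset on ties
def convBcore (s1s : String) (s2s : String) : Int × Int :=
  let s1 := s1s.toList
  let s2 := s2s.toList
  let pos : PySem.Dict Char (List Int) :=
    (PySem.List.enumerate s1).foldl
      (fun d ic => d.modify ic.2 [] (fun v => v ++ [ic.1])) PySem.Dict.empty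
  let counts : PySem.Dict Int Int :=
    (PySem.List.enumerate s2).foldl
      (fun c jc =>
        (pos.getD jc.2 []).foldl
          (fun c i1 => c.insert (i1 - jc.1) (c.getD (i1 - jc.1) 0 + 1)) c)
      PySem.Dict.empty
  counts.items.foldl
    (fun best oc =>
      if oc.2 > best.2 || (oc.2 == best.2 && oc.1 < best.1) then (oc.1, oc.2) else best)
    (0, 0)

def convolve_strings_alt (str1 : String) (str2 : String) : Int × Int :=
  if PySem.Str.len str1 < PySem.Str.len str2 then convBcore str2 str1
  else convBcore str1 str2

-- ===== PRECONDITION & SPEC =====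
def Spec_convolve_strings (str1 : String) (str2 : String) (out : Int × Int) : Prop := out = convolve_strings_alt str1 str2
instance (str1 : String) (str2 : String) (out : Int × Int) : Decidable (Spec_convolve_strings str1 str2 out) := by unfold Spec_convolve_strings; infer_instance

-- ===== CLAIM (what is proved, stated in full; the proofs are below) =====
def Claim_equal_convolve_strings : Prop := ∀ (str1 : String) (str2 : String), Dom_convolve_strings str1 str2 → Spec_convolve_strings str1 str2 (convolve_strings str1 str2)

-- ===== LEMMAS AND PROOFS =====

lemma pyRange_pairwise_lt (a b : Int) : (PySem.List.pyRange a b).Pairwise (· < ·) := by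
  by_cases h : b ≤ a
  · have he : PySem.List.pyRange a b = [] := by
      rw [List.eq_nil_iff_forall_not_mem]
      intro x hx; rw [PySem.List.mem_pyRange_one] at hx; omega
    simp [he]
  · have hb : b = a + ((List.replicate (b-a).toNat ()).length : Int) := by
      rw [List.length_replicate]; omega
    rw [hb, ← PySem.List.map_fst_enumerate]
    exact List.pairwise_map.mpr (PySem.List.pairwise_lt_enumerate _ _)

-- positions of character c in s1 (what B's pos.getD c [] computes)
def posL (s1 : List Char) (c : Char) : List Int :=
  ((PySem.List.enumerate s1).filter (fun ic => ic.2 == c)).map (fun ic => ic.1)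

lemma pos_getD (s1 : List Char) (c : Char) :
    ((PySem.List.enumerate s1).foldl
      (fun d ic => d.modify ic.2 [] (fun v => v ++ [ic.1])) PySem.Dict.empty).getD c []
      = posL s1 c := by
  have h : (PySem.List.enumerate s1).foldl
      (fun d ic => d.modify ic.2 [] (fun v => v ++ [ic.1])) PySem.Dict.empty
      = ((PySem.List.enumerate s1).map (fun ic => (ic.2, ic.1))).foldl
          (fun d p => d.modify p.1 [] (fun v => v ++ [p.2])) PySem.Dict.empty := by
    rw [List.foldl_map]
  rw [h, PySem.Dict.getD_foldl_modify_append]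
  simp [posL, List.filter_map, List.map_map, Function.comp_def, PySem.Dict.getD,
    PySem.Dict.get?_empty]

-- the multiset of offsets of all matching character pairs (what B counts)
def offL (s1 s2 : List Char) : List Int :=
  (PySem.List.enumerate s2).flatMap (fun jc => (posL s1 jc.2).map (fun i1 => i1 - jc.1))

-- B's counts dict is the counter of offL
lemma counts_eq_counter (s1 s2 : List Char) :
    ((PySem.List.enumerate s2).foldl
      (fun c jc =>
        ((((PySem.List.enumerate s1).foldl
            (fun d ic => d.modify ic.2 [] (fun v => v ++ [ic.1])) PySem.Dict.empty)).getD jc.2 []).foldl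
          (fun c i1 => c.insert (i1 - jc.1) (c.getD (i1 - jc.1) 0 + 1)) c)
      PySem.Dict.empty)
      = PySem.Dict.counter (offL s1 s2) := by
  have h1 : ∀ (jc : Int × Char) (c : PySem.Dict Int Int),
      ((posL s1 jc.2).foldl (fun c i1 => c.insert (i1 - jc.1) (c.getD (i1 - jc.1) 0 + 1)) c)
      = (((posL s1 jc.2).map (fun i1 => i1 - jc.1)).foldl
          (fun c x => c.insert x (c.getD x 0 + 1)) c) := by
    intro jc c; rw [List.foldl_map]
  simp only [pos_getD, h1]
  rw [← List.foldl_flatMap]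
  exact PySem.Dict.foldl_insert_getD_add_one_eq_counter _

lemma posL_nodup (s1 : List Char) (c : Char) : (posL s1 c).Nodup := by
  apply List.Pairwise.imp (fun {a b} (h : a < b) => ne_of_lt h)
  exact List.pairwise_map.mpr
    ((PySem.List.pairwise_lt_enumerate s1 0).filter _)

lemma posL_mem (s1 : List Char) (c : Char) (x : Int) :
    x ∈ posL s1 c ↔ (0 ≤ x ∧ x < (s1.length : Int) ∧ PySem.List.pyGet? s1 x = some c) := by
  simp only [posL, List.mem_map, List.mem_filter, PySem.List.mem_enumerate_iff]
  constructor
  · rintro ⟨⟨i, ch⟩, ⟨⟨k, hk, hp⟩, hc⟩, rfl⟩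
    simp only [Prod.mk.injEq] at hp
    obtain ⟨h1, h2⟩ := hp
    subst h1
    refine ⟨by omega, by omega, ?_⟩
    have hki : ((0:Int) + k) = ((k : Nat) : Int) := by omega
    rw [hki, PySem.List.pyGet?_natCast]
    simp only [beq_iff_eq] at hc
    simp [List.getElem?_eq_getElem hk, ← h2, hc]
  · rintro ⟨h0, hl, hg⟩
    have hx : x = ((x.toNat : Nat) : Int) := by omega
    rw [hx, PySem.List.pyGet?_natCast] at hg
    have hk : x.toNat < s1.length := by omega
    rw [List.getElem?_eq_getElem hk] at hg
    simp only [Option.some.injEq] at hg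
    exact ⟨(x, c), ⟨⟨x.toNat, hk, by simp [← hg]; omega⟩, by simp⟩, rfl⟩

-- the per-(offset i, position j) match predicate of A's inner loop, on lists
def predIJ (s1 s2 : List Char) (i j : Int) : Bool :=
  (decide (0 ≤ i + j) && decide (i + j < (s1.length : Int))) &&
    (PySem.List.pyGet? s1 (i + j) == PySem.List.pyGet? s2 j)

-- A's match count at offset i
def cntF (s1 s2 : List Char) (i : Int) : Int :=
  ((PySem.List.pyRange 0 s2.length).countP (predIJ s1 s2 i) : Int)

lemma posL_count (s1 : List Char) (c : Char) (x : Int) :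
    (posL s1 c).count x
      = if (0 ≤ x ∧ x < (s1.length : Int) ∧ PySem.List.pyGet? s1 x = some c) then 1 else 0 := by
  by_cases h : x ∈ posL s1 c
  · rw [if_pos ((posL_mem s1 c x).mp h)]
    exact List.count_eq_one_of_mem (posL_nodup s1 c) h
  · rw [if_neg (fun hc => h ((posL_mem s1 c x).mpr hc))]
    exact List.count_eq_zero_of_not_mem h

-- counting bijection: occurrences of offset i in offL = A's match count at i
lemma count_offL (s1 s2 : List Char) (i : Int) :
    ((offL s1 s2).count i : Int) = cntF s1 s2 i := by
  unfold offL cntF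
  rw [List.count_flatMap, PySem.List.enumerate_eq_map_pyRange s2 'a', List.map_map]
  have hlen : PySem.List.len s2 = (s2.length : Int) := by
    simp [PySem.List.len]
  rw [hlen]
  have hmap : ((PySem.List.pyRange 0 (s2.length : Int))).map
        ((List.count i ∘ fun jc => (posL s1 jc.2).map fun i1 => i1 - jc.1) ∘
          fun j => (j, PySem.List.pyGetD s2 j 'a'))
      = ((PySem.List.pyRange 0 (s2.length : Int))).map
          (fun j => if predIJ s1 s2 i j then 1 else 0) := by
    apply List.map_congr_left
    intro j hj
    rw [PySem.List.mem_pyRange_one] at hj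
    simp only [Function.comp_apply]
    have hcm := List.count_map_of_injective (posL s1 (PySem.List.pyGetD s2 j 'a'))
      (fun i1 => i1 - j) (fun a b h => by dsimp only [] at h; omega) (i + j)
    simp only [add_sub_cancel_right] at hcm
    rw [hcm, posL_count]
    have hsome : PySem.List.pyGet? s2 j = some (PySem.List.pyGetD s2 j 'a') := by
      have hx : j = ((j.toNat : Nat) : Int) := by omega
      have hk : j.toNat < s2.length := by omega
      rw [hx, PySem.List.pyGet?_natCast, List.getElem?_eq_getElem hk,
        PySem.List.pyGetD_eq_getElem s2 'a' (by omega) (by omega)]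
      simp only [Option.some.injEq]
      congr 1
    unfold predIJ
    rw [hsome]
    by_cases h1 : 0 ≤ i + j
    · by_cases h2 : i + j < (s1.length : Int)
      · simp [h1, h2]
      · simp [h1, h2]
    · simp [h1]
  rw [hmap]
  exact_mod_cast PySem.List.sum_map_ite_one_zero_nat (predIJ s1 s2 i) _

-- a positive match count puts the offset inside A's scanned range
lemma cntF_pos_mem (s1 s2 : List Char) (i : Int) (h : 0 < cntF s1 s2 i) :
    -(s2.length : Int) + 1 ≤ i ∧ i < (s1.length : Int) := by
  unfold cntF at h
  have h' : 0 < (PySem.List.pyRange 0 (s2.length : Int)).countP (predIJ s1 s2 i) := by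
    exact_mod_cast h
  obtain ⟨j, hj, hp⟩ := List.countP_pos_iff.mp h'
  rw [PySem.List.mem_pyRange_one] at hj
  unfold predIJ at hp
  simp only [Bool.and_eq_true, decide_eq_true_eq] at hp
  omega

-- "p is no better than r" for (offset, count) pairs
def pairLE (p r : Int × Int) : Prop := p.2 < r.2 ∨ (p.2 = r.2 ∧ r.1 ≤ p.1)

lemma pairLE_trans {p q r : Int × Int} (h1 : pairLE p q) (h2 : pairLE q r) : pairLE p r := by
  unfold pairLE at *; omega

-- the shape of A's outer loop and of B's selection loop
def foldA (f : Int → Int) (b : Int × Int) (l : List Int) : Int × Int :=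
  l.foldl (fun mx i => if f i > mx.2 then (i, f i) else mx) b

def foldB (b : Int × Int) (ps : List (Int × Int)) : Int × Int :=
  ps.foldl (fun best oc =>
    if oc.2 > best.2 || (oc.2 == best.2 && oc.1 < best.1) then (oc.1, oc.2) else best) b

-- A's fold keeps the FIRST strict maximiser; over an increasing list that is
-- the smallest offset among the maximisers
lemma foldA_char (f : Int → Int) :
    ∀ (l : List Int), l.Pairwise (· < ·) → ∀ b : Int × Int,
      (foldA f b l = b ∧ ∀ i ∈ l, f i ≤ b.2) ∨
      ((foldA f b l).1 ∈ l ∧ (foldA f b l).2 = f (foldA f b l).1 ∧ b.2 < (foldA f b l).2 ∧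
        ∀ i ∈ l, f i < (foldA f b l).2 ∨ (f i = (foldA f b l).2 ∧ (foldA f b l).1 ≤ i)) := by
  intro l
  induction l with
  | nil => intro _ b; left; exact ⟨rfl, by simp⟩
  | cons x t IH =>
    intro hp b
    have hx : ∀ j ∈ t, x < j := (List.pairwise_cons.mp hp).1
    have ht : t.Pairwise (· < ·) := (List.pairwise_cons.mp hp).2
    by_cases hc : f x > b.2
    · have hf : foldA f b (x :: t) = foldA f (x, f x) t := by
        simp [foldA, hc]
      rcases IH ht (x, f x) with ⟨hr, hall⟩ | ⟨h1, h2, h3, h4⟩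
      · right
        rw [hf, hr]
        refine ⟨List.mem_cons_self, rfl, hc, ?_⟩
        intro i hi
        rcases List.mem_cons.mp hi with rfl | hit
        · exact Or.inr ⟨rfl, le_refl _⟩
        · rcases lt_or_eq_of_le (hall i hit) with h | h
          · exact Or.inl h
          · exact Or.inr ⟨h, le_of_lt (hx i hit)⟩
      · right
        rw [hf]
        refine ⟨List.mem_cons_of_mem _ h1, h2, lt_trans hc h3, ?_⟩
        intro i hi
        rcases List.mem_cons.mp hi with rfl | hit
        · exact Or.inl h3
        · exact h4 i hit
    · have hf : foldA f b (x :: t) = foldA f b t := by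
        simp [foldA, hc]
      rcases IH ht b with ⟨hr, hall⟩ | ⟨h1, h2, h3, h4⟩
      · left
        rw [hf, hr]
        refine ⟨rfl, ?_⟩
        intro i hi
        rcases List.mem_cons.mp hi with rfl | hit
        · omega
        · exact hall i hit
      · right
        rw [hf]
        refine ⟨List.mem_cons_of_mem _ h1, h2, h3, ?_⟩
        intro i hi
        rcases List.mem_cons.mp hi with rfl | hit
        · left; omega
        · exact h4 i hit

-- B's fold is a running maximum (larger count, smaller offset on ties)
lemma foldB_char : ∀ (ps : List (Int × Int)) (b : Int × Int),
    (foldB b ps = b ∨ foldB b ps ∈ ps) ∧ ∀ p ∈ b :: ps, pairLE p (foldB b ps) := by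
  intro ps
  induction ps with
  | nil =>
    intro b
    refine ⟨Or.inl rfl, ?_⟩
    intro p hp
    rcases List.mem_cons.mp hp with rfl | h
    · exact Or.inr ⟨rfl, le_refl _⟩
    · simp at h
  | cons oc t IH =>
    intro b
    by_cases hc : (oc.2 > b.2 || (oc.2 == b.2 && oc.1 < b.1)) = true
    · have hf : foldB b (oc :: t) = foldB (oc.1, oc.2) t := by
        simp only [foldB, List.foldl_cons, hc, if_pos]
      have hble : pairLE b (oc.1, oc.2) := by
        simp only [Bool.or_eq_true, decide_eq_true_eq, Bool.and_eq_true, beq_iff_eq] at hc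
        unfold pairLE; simp only []; omega
      rcases IH (oc.1, oc.2) with ⟨hmem, hall⟩
      constructor
      · rw [hf]
        rcases hmem with h | h
        · right; rw [h]; exact List.mem_cons_self
        · right; exact List.mem_cons_of_mem _ h
      · intro p hp
        rw [hf]
        rcases List.mem_cons.mp hp with rfl | hp'
        · exact pairLE_trans hble (hall _ List.mem_cons_self)
        · rcases List.mem_cons.mp hp' with rfl | hpt
          · exact hall _ List.mem_cons_self
          · exact hall _ (List.mem_cons_of_mem _ hpt)
    · have hf : foldB b (oc :: t) = foldB b t := by
        simp only [foldB, List.foldl_cons]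
        simp [hc]
      have hole : pairLE oc b := by
        simp only [Bool.or_eq_true, decide_eq_true_eq, Bool.and_eq_true, beq_iff_eq,
          not_or, not_and] at hc
        unfold pairLE; omega
      rcases IH b with ⟨hmem, hall⟩
      constructor
      · rw [hf]
        rcases hmem with h | h
        · left; exact h
        · right; exact List.mem_cons_of_mem _ h
      · intro p hp
        rw [hf]
        rcases List.mem_cons.mp hp with rfl | hp'
        · exact hall _ List.mem_cons_self
        · rcases List.mem_cons.mp hp' with rfl | hpt
          · exact pairLE_trans hole (hall _ List.mem_cons_self)
          · exact hall _ (List.mem_cons_of_mem _ hpt)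

-- the heart: after the (identical) swap, A's loop equals B's core
lemma core_eq (s1 s2 : String) :
    convAloop s1 s2 (PySem.Str.len s1) (PySem.Str.len s2) = convBcore s1 s2 := by
  have hA : convAloop s1 s2 (PySem.Str.len s1) (PySem.Str.len s2)
      = foldA (cntF s1.toList s2.toList) (0, 0)
          (PySem.List.pyRange (-(s2.toList.length : Int) + 1) (s1.toList.length : Int)) := by
    unfold convAloop foldA
    rw [PySem.Str.len_eq, PySem.Str.len_eq]
    congr 1
    funext mx i
    have hin : (PySem.List.pyRange 0 (s2.toList.length : Int)).foldl
        (fun c j => if (decide (0 ≤ i + j) && decide (i + j < (s1.toList.length : Int))) &&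
            (PySem.Str.pyGet? s1 (i + j) == PySem.Str.pyGet? s2 j) then c + 1 else c) (0 : Int)
        = cntF s1.toList s2.toList i := by
      have hp : (fun j => (decide (0 ≤ i + j) && decide (i + j < (s1.toList.length : Int))) &&
            (PySem.Str.pyGet? s1 (i + j) == PySem.Str.pyGet? s2 j))
          = predIJ s1.toList s2.toList i := by
        funext j
        unfold predIJ
        simp [pysem]
      rw [PySem.List.foldl_count_if, zero_add, hp]
      rfl
    simp only [hin]
  have hB : convBcore s1 s2
      = foldB (0, 0) ((PySem.Set.ofList (offL s1.toList s2.toList)).map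
          (fun k => (k, ((offL s1.toList s2.toList).count k : Int)))) := by
    unfold convBcore foldB
    simp only [counts_eq_counter, PySem.Dict.items_counter]
  rw [hA, hB]
  set C1 := s1.toList
  set C2 := s2.toList
  set f := cntF C1 C2 with hfdef
  set L := offL C1 C2 with hLdef
  set R := PySem.List.pyRange (-(C2.length : Int) + 1) (C1.length : Int) with hRdef
  set ps := (PySem.Set.ofList L).map (fun k => (k, (L.count k : Int))) with hpsdef
  have hmemR : ∀ x : Int, 0 < f x → x ∈ R := by
    intro x hx
    rw [hRdef, PySem.List.mem_pyRange_one]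
    exact cntF_pos_mem C1 C2 x hx
  have hcountf : ∀ x : Int, x ∈ L → 0 < f x := by
    intro x hx
    have h1 : 0 < L.count x := List.count_pos_iff.mpr hx
    have h2 := count_offL C1 C2 x
    rw [← hfdef, ← hLdef] at h2
    omega
  rcases foldA_char f R (pyRange_pairwise_lt _ _) (0, 0) with ⟨hr, hall⟩ | ⟨h1, h2, h3, h4⟩
  · -- no offset has a positive count: L is empty, both sides are (0, 0)
    have hLnil : L = [] := by
      rw [List.eq_nil_iff_forall_not_mem]
      intro x hx
      have h0 := hcountf x hx
      have := hall x (hmemR x h0)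
      omega
    rw [hr]
    rw [hpsdef, hLnil]
    simp [PySem.Set.ofList_nil, foldB]
  · -- some offset matches: both sides are the unique best (offset, count) pair
    set r := foldA f (0, 0) R with hrdef
    obtain ⟨hmemB, hallB⟩ := foldB_char ps (0, 0)
    set rB := foldB (0, 0) ps with hrBdef
    have hrps : r ∈ ps := by
      rw [hpsdef]
      refine List.mem_map.mpr ⟨r.1, ?_, ?_⟩
      · rw [PySem.Set.mem_ofList]
        by_contra hnm
        have hz : L.count r.1 = 0 := List.count_eq_zero_of_not_mem hnm
        have hco := count_offL C1 C2 r.1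
        rw [← hfdef, ← hLdef] at hco
        omega
      · have hco := count_offL C1 C2 r.1
        rw [← hfdef, ← hLdef] at hco
        have hv : (L.count r.1 : Int) = r.2 := by omega
        rw [hv]
    have hab : pairLE r rB := hallB r (List.mem_cons_of_mem _ hrps)
    have hba : pairLE rB r := by
      rcases hmemB with h | h
      · rw [h]; exact Or.inl h3
      · rw [hpsdef] at h
        obtain ⟨k, hk, hkeq⟩ := List.mem_map.mp h
        rw [PySem.Set.mem_ofList] at hk
        have hfk : (L.count k : Int) = f k := by
          have hco := count_offL C1 C2 k
          rw [← hfdef, ← hLdef] at hco; exact hco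
        have hkpos : 0 < f k := hcountf k hk
        have hkR : k ∈ R := hmemR k hkpos
        have := h4 k hkR
        unfold pairLE
        rw [← hkeq]
        simp only [hfk]
        omega
    have hcomp : rB.1 = r.1 ∧ rB.2 = r.2 := by
      unfold pairLE at hab hba
      omega
    exact (Prod.ext_iff.mpr hcomp).symm

-- ===== VERDICT (by name: the statement is the Claim_ definition above) =====
theorem convolve_strings_spec : Claim_equal_convolve_strings := by
  intro str1 str2 _
  show convolve_strings str1 str2 = convolve_strings_alt str1 str2
  simp only [convolve_strings, convolve_strings_alt]
  by_cases h : PySem.Str.len str1 < PySem.Str.len str2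
  · rw [if_pos h, if_pos h]; exact core_eq str2 str1
  · rw [if_neg h, if_neg h]; exact core_eq str1 str2
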